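-- pv_equiv track=rewrite | github.com/ColorIan41/SRM_Lab5 | boolfunc.py | zhegalkin
-- ===== SOURCE A (Python) =====
-- def zhegalkin(table, f):
--     items = f
--     triangle = []
--     tempResult = []
--     for i in range(0, len(items)):
--         tempResult.append(items[0])
--         for item in range(0, (len(items) - 1)):
--             temp = items[item] ^ items[item + 1]
--             triangle.append(temp)
--         items = triangle
--         triangle = []
--
--     output = 'F3 = '
--     for i in range(0, len(tempResult)):
--         if tempResult[i] != 0:
--             for j in range(0, 4):
--                 if j == 0 and table[i][j] != 0:
--                     output += 'X'
--                 elif j == 1 and table[i][j] != 0: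
--                     output += 'Y'
--                 elif j == 2 and table[i][j] != 0:
--                     output += 'Z'
--                 elif j == 3 and i == 0 and table[i][j] != 0:
--                     output += '1'
--             output += ' ⊕ '
--     return output[0:-2]
-- ===== SOURCE B (Python) =====
-- def zhegalkin(table, f):
--     # Closed-form Moebius/Lucas formula: ANF coefficient i is the XOR of f[k]
--     # over the submasks k of i (Lucas' theorem), instead of A's XOR triangle;
--     # terms are then rendered with a join.
--     n = len(f)
--     terms = []
--     for i in range(n):
--         c = 0
--         for k in range(i + 1):
--             if k & i == k:
--                 c ^= f[k]
--         if c != 0: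
--             row = table[i]
--             t = ''
--             if row[0] != 0:
--                 t += 'X'
--             if row[1] != 0:
--                 t += 'Y'
--             if row[2] != 0:
--                 t += 'Z'
--             if i == 0 and row[3] != 0:
--                 t += '1'
--             terms.append(t)
--     if terms:
--         return 'F3 = ' + ' ⊕ '.join(terms) + ' '
--     return 'F3 '
-- ===== Notes on version B (the rewrite author's own statement) =====
-- stated objective: alternative
-- what changed: Replaces A's iterated XOR-difference triangle (rebuilding a fresh list each of the n rounds and collecting the row heads) by the closed-form Lucas/Moebius formula: ANF coefficient i is the XOR of f[k] over the bitwise submasks k of i, computed in one pass per coefficient; the output string is built with a join over a list of terms instead of append-then-slice.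
import Mathlib
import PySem

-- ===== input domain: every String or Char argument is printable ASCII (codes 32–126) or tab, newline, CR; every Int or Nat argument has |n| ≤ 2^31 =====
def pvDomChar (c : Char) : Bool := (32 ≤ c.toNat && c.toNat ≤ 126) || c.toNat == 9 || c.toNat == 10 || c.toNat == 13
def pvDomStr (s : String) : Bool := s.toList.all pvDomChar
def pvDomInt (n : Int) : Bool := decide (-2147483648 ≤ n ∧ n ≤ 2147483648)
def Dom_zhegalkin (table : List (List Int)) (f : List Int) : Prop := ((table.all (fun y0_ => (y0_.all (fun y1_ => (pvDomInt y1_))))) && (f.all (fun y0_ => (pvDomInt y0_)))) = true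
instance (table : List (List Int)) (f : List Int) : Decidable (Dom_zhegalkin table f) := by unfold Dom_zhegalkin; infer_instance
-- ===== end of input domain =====

-- B re-implements A's XOR-triangle by the closed-form Lucas/Möbius formula (ANF
-- coefficient i = XOR of f[k] over bitwise submasks k of i) and joins the terms;
-- same return value on every input where A returns (a different algorithm, similar cost).

-- ===== PORT A =====
def zhegalkin (table : List (List Int)) (f : List Int) : String :=
  -- triangle phase: repeatedly replace items by adjacent XORs, recording items[0]
  let st := (PySem.List.pyRange 0 (f.length : Int) 1).foldl
    (fun (s : List Int × List Int) _i =>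
      let items := s.1
      let tempResult := s.2 ++ [PySem.List.pyGetD items 0 0]
      let triangle := (PySem.List.pyRange 0 ((items.length : Int) - 1) 1).foldl
        (fun tr item =>
          tr ++ [PySem.Int.bxor (PySem.List.pyGetD items item 0)
                                (PySem.List.pyGetD items (item + 1) 0)]) []
      (triangle, tempResult))
    (f, [])
  let tempResult := st.2
  let output := (PySem.List.pyRange 0 (tempResult.length : Int) 1).foldl
    (fun out i =>
      if PySem.List.pyGetD tempResult i 0 ≠ 0 then
        let out := (PySem.List.pyRange 0 4 1).foldl
          (fun out j =>
            if j = 0 ∧ PySem.List.pyGetD (PySem.List.pyGetD table i []) j 0 ≠ 0 then out ++ ['X']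
            else if j = 1 ∧ PySem.List.pyGetD (PySem.List.pyGetD table i []) j 0 ≠ 0 then out ++ ['Y']
            else if j = 2 ∧ PySem.List.pyGetD (PySem.List.pyGetD table i []) j 0 ≠ 0 then out ++ ['Z']
            else if j = 3 ∧ i = 0 ∧ PySem.List.pyGetD (PySem.List.pyGetD table i []) j 0 ≠ 0 then out ++ ['1']
            else out) out
        out ++ " ⊕ ".toList
      else out)
    "F3 = ".toList
  String.ofList (PySem.List.slice output (some 0) (some (-2)))

-- ===== PORT B =====
def zhegalkin_alt (table : List (List Int)) (f : List Int) : String :=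
  let n := f.length
  let terms := (PySem.List.pyRange 0 (n : Int) 1).foldl
    (fun (terms : List (List Char)) i =>
      let c := (PySem.List.pyRange 0 (i + 1) 1).foldl
        (fun c k =>
          if PySem.Int.band k i = k then PySem.Int.bxor c (PySem.List.pyGetD f k 0) else c) 0
      if c ≠ 0 then
        let row := PySem.List.pyGetD table i []
        let t : List Char := []
        let t := if PySem.List.pyGetD row 0 0 ≠ 0 then t ++ ['X'] else t
        let t := if PySem.List.pyGetD row 1 0 ≠ 0 then t ++ ['Y'] else t
        let t := if PySem.List.pyGetD row 2 0 ≠ 0 then t ++ ['Z'] else t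
        let t := if i = 0 ∧ PySem.List.pyGetD row 3 0 ≠ 0 then t ++ ['1'] else t
        terms ++ [t]
      else terms) []
  if terms ≠ [] then
    String.ofList ("F3 = ".toList ++ PySem.Chars.join " ⊕ ".toList terms ++ [' '])
  else "F3 "

-- ===== PRECONDITION & SPEC =====
-- closed-form ANF coefficient (Möbius/Lucas): XOR of f[k] over the submasks k of i
def pvX (l : List Int) : Int := l.foldr PySem.Int.bxor 0
def pvE (i n : ℕ) : List ℕ := (List.range n).filter (fun k => k &&& i = k)
def pvCoef (f : List Int) (i : ℕ) : Int := pvX ((pvE i f.length).map (fun k => f.getD k 0))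

-- Pre_ excludes exactly the inputs where Python A raises IndexError: some ANF
-- coefficient i is nonzero but table has no row i, the row is shorter than 3,
-- or (for i = 0 only, the constant term) shorter than 4.
def Pre_zhegalkin (table : List (List Int)) (f : List Int) : Prop :=
  ∀ i < f.length, pvCoef f i ≠ 0 →
    i < table.length ∧ 3 ≤ (table.getD i []).length ∧ (i = 0 → 4 ≤ (table.getD i []).length)
instance (table : List (List Int)) (f : List Int) : Decidable (Pre_zhegalkin table f) := by
  unfold Pre_zhegalkin; infer_instance

def pvWitness_zhegalkin : List (List Int) × List Int := ([[1, 0, 1, 1], [0, 1, 1]], [1, 0])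

def Spec_zhegalkin (table : List (List Int)) (f : List Int) (out : String) : Prop :=
  out = zhegalkin_alt table f
instance (table : List (List Int)) (f : List Int) (out : String) : Decidable (Spec_zhegalkin table f out) := by
  unfold Spec_zhegalkin; infer_instance

-- ===== CLAIM (what is proved, stated in full; the proofs are below) =====
def Claim_equal_zhegalkin : Prop := ∀ (table : List (List Int)) (f : List Int),
  Dom_zhegalkin table f → Pre_zhegalkin table f → Spec_zhegalkin table f (zhegalkin table f)

-- ===== LEMMAS AND PROOFS =====

-- XOR algebra via the sign/magnitude encoding of Python's infinite two's complement
def encI (s : Bool) (m : ℕ) : Int := if s then -(m:Int) - 1 else (m:Int)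

theorem bxor_encI (s₁ s₂ : Bool) (m₁ m₂ : ℕ) :
    PySem.Int.bxor (encI s₁ m₁) (encI s₂ m₂) = encI (xor s₁ s₂) (m₁ ^^^ m₂) := by
  cases s₁ <;> cases s₂ <;> simp [PySem.Int.bxor, encI] <;> omega

theorem exists_encI (a : Int) : ∃ s m, a = encI s m := by
  by_cases h : 0 ≤ a
  · exact ⟨false, a.toNat, by simp [encI]; omega⟩
  · exact ⟨true, (-a).toNat - 1, by simp [encI]; omega⟩

theorem bxor_assoc (a b c : Int) :
    PySem.Int.bxor (PySem.Int.bxor a b) c = PySem.Int.bxor a (PySem.Int.bxor b c) := by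
  obtain ⟨s₁, m₁, rfl⟩ := exists_encI a
  obtain ⟨s₂, m₂, rfl⟩ := exists_encI b
  obtain ⟨s₃, m₃, rfl⟩ := exists_encI c
  simp [bxor_encI, Nat.xor_assoc]

theorem zero_bxor (a : Int) : PySem.Int.bxor 0 a = a := by
  rw [PySem.Int.bxor_comm, PySem.Int.bxor_zero]

theorem pvX_nil : pvX [] = 0 := rfl
theorem pvX_cons (a : Int) (l : List Int) : pvX (a :: l) = PySem.Int.bxor a (pvX l) := rfl

theorem pvX_append (l₁ l₂ : List Int) : pvX (l₁ ++ l₂) = PySem.Int.bxor (pvX l₁) (pvX l₂) := by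
  induction l₁ with
  | nil => simp [pvX_nil, zero_bxor]
  | cons a t ih => simp [pvX_cons, ih, bxor_assoc]

theorem pvX_perm {l₁ l₂ : List Int} (h : l₁.Perm l₂) : pvX l₁ = pvX l₂ :=
  List.Perm.foldr_eq (lcomm := ⟨fun a b c => by
    rw [← bxor_assoc, ← bxor_assoc, PySem.Int.bxor_comm a b]⟩) h 0

-- Pascal-parity identity on submasks (the Lucas step)
theorem land_two (a b c d : ℕ) (hc : c ≤ 1) (hd : d ≤ 1) :
    (2*a+c) &&& (2*b+d) = 2*(a &&& b) + (c &&& d) := by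
  apply Nat.eq_of_testBit_eq
  intro j
  cases j with
  | zero =>
    simp only [Nat.testBit_and, Nat.testBit_zero]
    interval_cases c <;> interval_cases d <;> simp [Nat.add_mul_mod_self_left] <;> omega
  | succ j =>
    simp only [Nat.testBit_and]
    simp only [Nat.testBit_succ]
    have h1 : (2*a+c)/2 = a := by omega
    have h2 : (2*b+d)/2 = b := by omega
    have h3 : (2*(a &&& b)+(c &&& d))/2 = a &&& b := by
      have : c &&& d ≤ 1 := le_trans Nat.and_le_left hc
      omega
    rw [h1, h2, h3, Nat.testBit_and]

theorem sub_succ (k i : ℕ) :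
    decide ((k+1) &&& (i+1) = k+1)
      = ((decide ((k+1) &&& i = k+1)).xor (decide (k &&& i = k))) := by
  induction k using Nat.strong_induction_on generalizing i with
  | _ k IH =>
  set a := k / 2 with ha
  set b := i / 2 with hb
  rcases Nat.mod_two_eq_zero_or_one k with hk | hk <;> rcases Nat.mod_two_eq_zero_or_one i with hi | hi
  · have hk' : k = 2*a := by omega
    have hi' : i = 2*b := by omega
    rw [hk', hi']
    have e1 : (2*a+1) &&& (2*b+1) = 2*(a&&&b)+1 := land_two a b 1 1 (by omega) (by omega)
    have e2 : (2*a+1) &&& (2*b) = 2*(a&&&b) := by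
      have := land_two a b 1 0 (by omega) (by omega); simpa using this
    have e3 : (2*a) &&& (2*b) = 2*(a&&&b) := by
      have := land_two a b 0 0 (by omega) (by omega); simpa using this
    rw [e1, e2, e3]
    have g1 : (2*(a&&&b)+1 = 2*a+1) ↔ (a&&&b = a) := by omega
    have g2 : ¬(2*(a&&&b) = 2*a+1) := by omega
    have g3 : (2*(a&&&b) = 2*a) ↔ (a&&&b = a) := by omega
    simp [g1, g2, g3]
  · have hk' : k = 2*a := by omega
    have hi' : i = 2*b+1 := by omega
    rw [hk', hi']
    have e1 : (2*a+1) &&& (2*b+1+1) = 2*(a&&&(b+1)) := by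
      have := land_two a (b+1) 1 0 (by omega) (by omega)
      rw [show 2*b+1+1 = 2*(b+1) by omega] at *; simpa using this
    have e2 : (2*a+1) &&& (2*b+1) = 2*(a&&&b)+1 := land_two a b 1 1 (by omega) (by omega)
    have e3 : (2*a) &&& (2*b+1) = 2*(a&&&b) := by
      have := land_two a b 0 1 (by omega) (by omega); simpa using this
    rw [e1, e2, e3]
    have g1 : ¬(2*(a&&&(b+1)) = 2*a+1) := by omega
    have g2 : (2*(a&&&b)+1 = 2*a+1) ↔ (a&&&b = a) := by omega
    have g3 : (2*(a&&&b) = 2*a) ↔ (a&&&b = a) := by omega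
    simp [g1, g2, g3]
  · have hk' : k = 2*a+1 := by omega
    have hi' : i = 2*b := by omega
    rw [hk', hi']
    have e1 : (2*a+1+1) &&& (2*b+1) = 2*((a+1)&&&b) := by
      have := land_two (a+1) b 0 1 (by omega) (by omega)
      rw [show 2*a+1+1 = 2*(a+1) by omega] at *; simpa using this
    have e2 : (2*a+1+1) &&& (2*b) = 2*((a+1)&&&b) := by
      have := land_two (a+1) b 0 0 (by omega) (by omega)
      rw [show 2*a+1+1 = 2*(a+1) by omega] at *; simpa using this
    have e3 : (2*a+1) &&& (2*b) = 2*(a&&&b) := by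
      have h := land_two a b 1 0 (by omega) (by omega)
      rw [show (1 &&& 0 : ℕ) = 0 by decide] at h; omega
    rw [e1, e2, e3]
    have g1 : (2*((a+1)&&&b) = 2*a+1+1) ↔ ((a+1)&&&b = a+1) := by omega
    have g2 : ¬(2*(a&&&b) = 2*a+1) := by omega
    simp [g1, g2]
  · have hk' : k = 2*a+1 := by omega
    have hi' : i = 2*b+1 := by omega
    rw [hk', hi']
    have e1 : (2*a+1+1) &&& (2*b+1+1) = 2*((a+1)&&&(b+1)) := by
      have := land_two (a+1) (b+1) 0 0 (by omega) (by omega)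
      rw [show 2*a+1+1 = 2*(a+1) by omega, show 2*b+1+1 = 2*(b+1) by omega] at *; simpa using this
    have e2 : (2*a+1+1) &&& (2*b+1) = 2*((a+1)&&&b) := by
      have := land_two (a+1) b 0 1 (by omega) (by omega)
      rw [show 2*a+1+1 = 2*(a+1) by omega] at *; simpa using this
    have e3 : (2*a+1) &&& (2*b+1) = 2*(a&&&b)+1 := land_two a b 1 1 (by omega) (by omega)
    rw [e1, e2, e3]
    have hIH := IH a (by omega) b
    have g1 : (2*((a+1)&&&(b+1)) = 2*a+1+1) ↔ ((a+1)&&&(b+1) = a+1) := by omega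
    have g2 : (2*((a+1)&&&b) = 2*a+1+1) ↔ ((a+1)&&&b = a+1) := by omega
    have g3 : (2*(a&&&b)+1 = 2*a+1) ↔ (a&&&b = a) := by omega
    simp only [g1, g2, g3] at *
    exact hIH

-- propositional form of sub_succ
theorem sub_succ' (k i : ℕ) :
    ((k+1) &&& (i+1) = k+1) ↔ (((k+1) &&& i = k+1) ↔ ¬(k &&& i = k)) := by
  have h := sub_succ k i
  by_cases h1 : (k+1) &&& i = k+1 <;> by_cases h2 : k &&& i = k <;>
    simp [h1, h2] at h ⊢ <;> simp [h]

theorem sub_le {k i : ℕ} (h : k &&& i = k) : k ≤ i := h ▸ Nat.and_le_right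

theorem mem_pvE {k i n : ℕ} : k ∈ pvE i n ↔ k < n ∧ k &&& i = k := by
  simp [pvE, List.mem_filter, List.mem_range, and_comm]

theorem nodup_pvE (i n : ℕ) : (pvE i n).Nodup := (List.nodup_range).filter _

-- the symmetric-difference permutation behind one derivative step
theorem cntN {l : List ℕ} (h : l.Nodup) (a : ℕ) : l.count a = if a ∈ l then 1 else 0 := by
  by_cases hm : a ∈ l
  · simp [hm, List.count_eq_one_of_mem h hm]
  · simp [hm, List.count_eq_zero_of_not_mem hm]

theorem succ_inj' : Function.Injective (fun n : ℕ => n + 1) := fun a b h => by simp at h; omega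

theorem perm_step (i m : ℕ) (him : i < m) :
    (pvE i m ++ (pvE i m).map (· + 1)).Perm
      (pvE (i+1) (m+1) ++ ((((pvE i m).filter (fun k => (k+1) &&& i = k+1)).map (· + 1))
                        ++ (((pvE i m).filter (fun k => (k+1) &&& i = k+1)).map (· + 1)))) := by
  rw [List.perm_iff_count]
  intro x
  have hs := nodup_pvE i m
  have ht : ((pvE i m).map (· + 1)).Nodup := hs.map succ_inj'
  have hE := nodup_pvE (i+1) (m+1)
  have hD : (((pvE i m).filter (fun k => (k+1) &&& i = k+1)).map (· + 1)).Nodup :=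
    (hs.filter _).map succ_inj'
  simp only [List.count_append, cntN hs, cntN ht, cntN hE, cntN hD]
  cases x with
  | zero =>
    have h1 : (0 ∈ pvE i m) := mem_pvE.2 ⟨by omega, Nat.zero_and i⟩
    have h2 : ¬(0 ∈ (pvE i m).map (· + 1)) := by simp [List.mem_map]
    have h3 : (0 ∈ pvE (i+1) (m+1)) := mem_pvE.2 ⟨by omega, Nat.zero_and (i+1)⟩
    have h4 : ¬(0 ∈ ((pvE i m).filter (fun k => (k+1) &&& i = k+1)).map (· + 1)) := by
      simp [List.mem_map]
    simp [h1, h2, h3, h4]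
  | succ k =>
    have e2 : (k+1 ∈ (pvE i m).map (· + 1)) ↔ k ∈ pvE i m := by
      simp only [List.mem_map]
      constructor
      · rintro ⟨a, ha, hak⟩; simpa [show a = k by omega] using ha
      · intro hk; exact ⟨k, hk, rfl⟩
    have e4 : (k+1 ∈ ((pvE i m).filter (fun k => (k+1) &&& i = k+1)).map (· + 1))
        ↔ (k ∈ pvE i m ∧ (k+1) &&& i = k+1) := by
      simp only [List.mem_map, List.mem_filter]
      constructor
      · rintro ⟨a, ⟨ha, hp⟩, hak⟩
        have : a = k := by omega
        subst this; exact ⟨ha, by simpa using hp⟩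
      · rintro ⟨hk, hq⟩; exact ⟨k, ⟨hk, by simpa using hq⟩, rfl⟩
    simp only [e2, e4]
    by_cases hQ : (k+1) &&& i = k+1 <;> by_cases hR : k &&& i = k
    · have hP : ¬((k+1) &&& (i+1) = k+1) := fun h => (((sub_succ' k i).1 h).1 hQ) hR
      have hkm : k + 1 < m := by have := sub_le hQ; omega
      have hkm' : k < m := by omega
      have hsmem : k+1 ∈ pvE i m := mem_pvE.2 ⟨hkm, hQ⟩
      have hkmem : k ∈ pvE i m := mem_pvE.2 ⟨hkm', hR⟩
      have hEmem : ¬(k+1 ∈ pvE (i+1) (m+1)) := fun h => hP (mem_pvE.1 h).2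
      simp [hsmem, hkmem, hEmem, hQ]
    · have hP : (k+1) &&& (i+1) = k+1 := (sub_succ' k i).2 (by tauto)
      have hkm : k + 1 < m := by have := sub_le hQ; omega
      have hsmem : k+1 ∈ pvE i m := mem_pvE.2 ⟨hkm, hQ⟩
      have hkmem : ¬(k ∈ pvE i m) := fun h => hR (mem_pvE.1 h).2
      have hEmem : k+1 ∈ pvE (i+1) (m+1) := mem_pvE.2 ⟨by omega, hP⟩
      simp [hsmem, hkmem, hEmem, hQ]
    · have hP : (k+1) &&& (i+1) = k+1 := (sub_succ' k i).2 (by tauto)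
      have hkm : k < m := by have := sub_le hR; omega
      have hsmem : ¬(k+1 ∈ pvE i m) := fun h => hQ (mem_pvE.1 h).2
      have hkmem : k ∈ pvE i m := mem_pvE.2 ⟨hkm, hR⟩
      have hEmem : k+1 ∈ pvE (i+1) (m+1) := mem_pvE.2 ⟨by omega, hP⟩
      simp [hsmem, hkmem, hEmem, hQ]
    · have hP : ¬((k+1) &&& (i+1) = k+1) := fun h => by
        have := (sub_succ' k i).1 h
        tauto
      have hsmem : ¬(k+1 ∈ pvE i m) := fun h => hQ (mem_pvE.1 h).2
      have hkmem : ¬(k ∈ pvE i m) := fun h => hR (mem_pvE.1 h).2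
      have hEmem : ¬(k+1 ∈ pvE (i+1) (m+1)) := fun h => hP (mem_pvE.1 h).2
      simp [hsmem, hkmem, hEmem, hQ]

theorem bxor4_swap (a b c d : Int) :
    PySem.Int.bxor (PySem.Int.bxor a b) (PySem.Int.bxor c d)
      = PySem.Int.bxor (PySem.Int.bxor a c) (PySem.Int.bxor b d) := by
  rw [bxor_assoc, bxor_assoc, ← bxor_assoc b c d, ← bxor_assoc c b d,
    PySem.Int.bxor_comm b c]

theorem pvX_map_bxor (S : List ℕ) (u v : ℕ → Int) :
    pvX (S.map (fun k => PySem.Int.bxor (u k) (v k)))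
      = PySem.Int.bxor (pvX (S.map u)) (pvX (S.map v)) := by
  induction S with
  | nil => simp [pvX_nil, PySem.Int.bxor_zero]
  | cons a t ih => simp [pvX_cons, ih, bxor4_swap]

def derivL (xs : List Int) : List Int :=
  (List.range (xs.length - 1)).map
    (fun k => PySem.Int.bxor (xs.getD k 0) (xs.getD (k+1) 0))

theorem length_derivL (xs : List Int) : (derivL xs).length = xs.length - 1 := by
  simp [derivL]

theorem pvE_zero (n : ℕ) (h : 0 < n) : pvE 0 n = [0] := by
  induction n with
  | zero => omega
  | succ n ih =>
    rw [pvE, List.range_succ, List.filter_append]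
    rcases Nat.eq_zero_or_pos n with hn | hn
    · subst hn; rfl
    · rw [← pvE, ih hn]
      have : ¬(n &&& 0 = n) := by rw [Nat.and_zero]; omega
      simp [this]
      omega

theorem coef_step (xs : List Int) (i : ℕ) (h : i + 1 < xs.length) :
    pvCoef (derivL xs) i = pvCoef xs (i+1) := by
  set n := xs.length with hn
  set g : ℕ → Int := fun k => xs.getD k 0 with hg
  have him : i < n - 1 := by omega
  have hlen : (derivL xs).length = n - 1 := length_derivL xs
  have step1 : (pvE i (n-1)).map (fun k => (derivL xs).getD k 0)
      = (pvE i (n-1)).map (fun k => PySem.Int.bxor (g k) (g (k+1))) := by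
    apply List.map_congr_left
    intro k hk
    have hkb : k < n - 1 := (mem_pvE.1 hk).1
    simp only [derivL, ← hn]
    rw [PySem.List.getD_map_range _ _ _ _ hkb]
  have step2 : (pvE i (n-1)).map (fun k => g (k+1)) = ((pvE i (n-1)).map (· + 1)).map g := by
    rw [List.map_map]; rfl
  calc pvCoef (derivL xs) i
      = pvX ((pvE i (n-1)).map (fun k => PySem.Int.bxor (g k) (g (k+1)))) := by
        rw [pvCoef, hlen, step1]
    _ = PySem.Int.bxor (pvX ((pvE i (n-1)).map g)) (pvX (((pvE i (n-1)).map (· + 1)).map g)) := by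
        rw [pvX_map_bxor, step2]
    _ = pvX ((pvE i (n-1) ++ (pvE i (n-1)).map (· + 1)).map g) := by
        rw [List.map_append, pvX_append]
    _ = pvX ((pvE (i+1) ((n-1)+1)
          ++ ((((pvE i (n-1)).filter (fun k => (k+1) &&& i = k+1)).map (· + 1))
            ++ (((pvE i (n-1)).filter (fun k => (k+1) &&& i = k+1)).map (· + 1)))).map g) := by
        exact pvX_perm ((perm_step i (n-1) him).map g)
    _ = pvCoef xs (i+1) := by
        rw [List.map_append, pvX_append, List.map_append, pvX_append,
          PySem.Int.bxor_self, PySem.Int.bxor_zero, pvCoef]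
        have : (n-1)+1 = n := by omega
        rw [this]

theorem coef_head (i : ℕ) (xs : List Int) (h : i < xs.length) :
    (derivL^[i] xs).getD 0 0 = pvCoef xs i := by
  induction i generalizing xs with
  | zero =>
    simp only [Function.iterate_zero, id]
    rw [pvCoef, pvE_zero _ (by omega)]
    simp [pvX_cons, pvX_nil, PySem.Int.bxor_zero]
  | succ i ih =>
    rw [Function.iterate_succ_apply]
    have hlen : i < (derivL xs).length := by rw [length_derivL]; omega
    rw [ih (derivL xs) hlen, coef_step xs i h]


-- ===== port-structure lemmas =====

theorem innerA (items : List Int) :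
    (PySem.List.pyRange 0 ((items.length : Int) - 1) 1).foldl
      (fun tr item =>
        tr ++ [PySem.Int.bxor (PySem.List.pyGetD items item 0)
                              (PySem.List.pyGetD items (item + 1) 0)]) []
      = derivL items := by
  rcases Nat.eq_zero_or_pos items.length with h0 | h0
  · rw [h0]
    rw [PySem.List.pyRange_one_eq_nil (by omega)]
    simp [derivL, h0]
  · have hcast : ((items.length : Int) - 1) = ((items.length - 1 : ℕ) : Int) := by push_cast; omega
    rw [hcast, PySem.List.pyRange_zero_nat, List.foldl_map,
      PySem.List.foldl_append_singleton_eq_map]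
    rw [derivL]
    simp only [List.nil_append]
    apply List.map_congr_left
    intro k _
    have h1 : ((k : Int) + 1) = ((k + 1 : ℕ) : Int) := by push_cast; ring
    rw [h1, PySem.List.pyGetD_natCast, PySem.List.pyGetD_natCast]

theorem outerA (L : List Int) (xs acc : List Int) :
    L.foldl
      (fun (s : List Int × List Int) _i => (derivL s.1, s.2 ++ [s.1.getD 0 0]))
      (xs, acc)
      = (derivL^[L.length] xs,
         acc ++ (List.range L.length).map (fun j => (derivL^[j] xs).getD 0 0)) := by
  induction L generalizing xs acc with
  | nil => simp
  | cons hd tl ih =>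
    rw [List.foldl_cons]
    refine (ih (derivL xs) (acc ++ [xs.getD 0 0])).trans ?_
    rw [List.length_cons, Function.iterate_succ_apply]
    congr 1
    rw [List.range_succ_eq_map, List.map_cons, List.map_map]
    simp only [Function.iterate_zero, id_eq]
    rw [List.append_assoc, List.singleton_append]
    simp [Function.comp_def, Function.iterate_succ_apply]

-- the rendered term for row i, exactly as B builds it
def termC (table : List (List Int)) (i : Int) : List Char :=
  let row := PySem.List.pyGetD table i []
  let t : List Char := []
  let t := if PySem.List.pyGetD row 0 0 ≠ 0 then t ++ ['X'] else t
  let t := if PySem.List.pyGetD row 1 0 ≠ 0 then t ++ ['Y'] else t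
  let t := if PySem.List.pyGetD row 2 0 ≠ 0 then t ++ ['Z'] else t
  if i = 0 ∧ PySem.List.pyGetD row 3 0 ≠ 0 then t ++ ['1'] else t

theorem innerFmt (table : List (List Int)) (i : Int) (out : List Char) :
    (PySem.List.pyRange 0 4 1).foldl
      (fun out j =>
        if j = 0 ∧ PySem.List.pyGetD (PySem.List.pyGetD table i []) j 0 ≠ 0 then out ++ ['X']
        else if j = 1 ∧ PySem.List.pyGetD (PySem.List.pyGetD table i []) j 0 ≠ 0 then out ++ ['Y']
        else if j = 2 ∧ PySem.List.pyGetD (PySem.List.pyGetD table i []) j 0 ≠ 0 then out ++ ['Z']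
        else if j = 3 ∧ i = 0 ∧ PySem.List.pyGetD (PySem.List.pyGetD table i []) j 0 ≠ 0 then out ++ ['1']
        else out) out
      = out ++ termC table i := by
  rw [show PySem.List.pyRange 0 4 1 = [0, 1, 2, 3] from by decide]
  simp only [List.foldl_cons, List.foldl_nil, termC]
  by_cases hi : i = 0
  · subst hi
    by_cases c0 : PySem.List.pyGetD (PySem.List.pyGetD table 0 []) 0 0 ≠ 0 <;>
      by_cases c1 : PySem.List.pyGetD (PySem.List.pyGetD table 0 []) 1 0 ≠ 0 <;>
        by_cases c2 : PySem.List.pyGetD (PySem.List.pyGetD table 0 []) 2 0 ≠ 0 <;>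
          by_cases c3 : PySem.List.pyGetD (PySem.List.pyGetD table 0 []) 3 0 ≠ 0 <;>
            simp [c0, c1, c2, c3]
  · by_cases c0 : PySem.List.pyGetD (PySem.List.pyGetD table i []) 0 0 ≠ 0 <;>
      by_cases c1 : PySem.List.pyGetD (PySem.List.pyGetD table i []) 1 0 ≠ 0 <;>
        by_cases c2 : PySem.List.pyGetD (PySem.List.pyGetD table i []) 2 0 ≠ 0 <;>
          simp [hi, c0, c1, c2]

theorem fmtA (table : List (List Int)) (tempResult : List Int) (n : ℕ) (acc : List Char)
    (hn : n ≤ tempResult.length) :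
    (PySem.List.pyRange 0 (n : Int) 1).foldl
      (fun out i =>
        if PySem.List.pyGetD tempResult i 0 ≠ 0 then
          let out := (PySem.List.pyRange 0 4 1).foldl
            (fun out j =>
              if j = 0 ∧ PySem.List.pyGetD (PySem.List.pyGetD table i []) j 0 ≠ 0 then out ++ ['X']
              else if j = 1 ∧ PySem.List.pyGetD (PySem.List.pyGetD table i []) j 0 ≠ 0 then out ++ ['Y']
              else if j = 2 ∧ PySem.List.pyGetD (PySem.List.pyGetD table i []) j 0 ≠ 0 then out ++ ['Z']
              else if j = 3 ∧ i = 0 ∧ PySem.List.pyGetD (PySem.List.pyGetD table i []) j 0 ≠ 0 then out ++ ['1']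
              else out) out
          out ++ " ⊕ ".toList
        else out) acc
      = acc ++ ((List.range n).filter (fun j => tempResult.getD j 0 ≠ 0)).flatMap
          (fun (j : ℕ) => termC table (j : Int) ++ " ⊕ ".toList) := by
  induction n with
  | zero => simp [PySem.List.pyRange_one_eq_nil (by omega : (0:Int) ≤ 0)]
  | succ n ih =>
    have hc : ((n + 1 : ℕ) : Int) = (n : Int) + 1 := by push_cast; ring
    rw [hc, PySem.List.pyRange_one_succ_right (by positivity), List.foldl_append,
      ih (by omega), List.foldl_cons, List.foldl_nil]
    rw [innerFmt table (n : Int)]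
    simp only [PySem.List.pyGetD_natCast]
    rw [List.range_succ, List.filter_append, List.flatMap_append]
    by_cases hnz : tempResult.getD n 0 = 0 <;> simp [List.getD, hnz, List.append_assoc] <;>
      simp [List.getD] at hnz <;> simp [hnz]

theorem foldl_if_bxor (p : ℕ → Prop) [DecidablePred p] (g : ℕ → Int) (L : List ℕ) :
    ∀ c0 : Int, L.foldl (fun c k => if p k then PySem.Int.bxor c (g k) else c) c0
      = PySem.Int.bxor c0 (pvX ((L.filter (fun k => p k)).map g)) := by
  induction L with
  | nil => intro c0; simp [pvX_nil, PySem.Int.bxor_zero]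
  | cons a t ih =>
    intro c0
    by_cases ha : p a
    · rw [List.foldl_cons, if_pos ha, ih, List.filter_cons, if_pos (by simpa using ha),
        List.map_cons, pvX_cons, bxor_assoc]
    · rw [List.foldl_cons, if_neg ha, ih, List.filter_cons, if_neg (by simpa using ha)]

theorem pvE_trunc (j n : ℕ) (h : j < n) :
    pvE j n = (List.range (j+1)).filter (fun k => k &&& j = k) := by
  rw [pvE, show n = (j+1) + (n-j-1) by omega, List.range_add, List.filter_append]
  have : (List.filter (fun k => decide (k &&& j = k)) ((List.range (n-j-1)).map (fun x => j+1+x))) = [] := by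
    rw [List.filter_eq_nil_iff]
    intro a ha
    simp only [List.mem_map] at ha
    obtain ⟨x, _, rfl⟩ := ha
    simp only [decide_eq_true_eq]
    intro hsub
    have := sub_le hsub
    omega
  rw [this, List.append_nil]

theorem coefB (f : List Int) (j : ℕ) (hj : j < f.length) :
    (PySem.List.pyRange 0 ((j : Int) + 1) 1).foldl
      (fun c k =>
        if PySem.Int.band k (j : Int) = k then PySem.Int.bxor c (PySem.List.pyGetD f k 0) else c) 0
      = pvCoef f j := by
  have hc : ((j : Int) + 1) = ((j + 1 : ℕ) : Int) := by push_cast; ring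
  rw [hc, PySem.List.pyRange_zero_nat, List.foldl_map]
  have hfun : ∀ (c : Int) (k : ℕ),
      (if PySem.Int.band (k : Int) (j : Int) = (k : Int) then PySem.Int.bxor c (PySem.List.pyGetD f (k : Int) 0) else c)
        = (if k &&& j = k then PySem.Int.bxor c (f.getD k 0) else c) := by
    intro c k
    rw [PySem.Int.band_natCast, PySem.List.pyGetD_natCast]
    by_cases hk : k &&& j = k
    · rw [if_pos (by exact_mod_cast hk), if_pos hk]
    · rw [if_neg (by exact_mod_cast hk), if_neg hk]
  simp only [hfun]
  rw [foldl_if_bxor, zero_bxor, pvCoef, pvE_trunc j f.length hj]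

theorem fmtB (table : List (List Int)) (f : List Int) (n : ℕ) (hn : n ≤ f.length)
    (acc : List (List Char)) :
    (PySem.List.pyRange 0 (n : Int) 1).foldl
      (fun (terms : List (List Char)) i =>
        let c := (PySem.List.pyRange 0 (i + 1) 1).foldl
          (fun c k =>
            if PySem.Int.band k i = k then PySem.Int.bxor c (PySem.List.pyGetD f k 0) else c) 0
        if c ≠ 0 then
          let row := PySem.List.pyGetD table i []
          let t : List Char := []
          let t := if PySem.List.pyGetD row 0 0 ≠ 0 then t ++ ['X'] else t
          let t := if PySem.List.pyGetD row 1 0 ≠ 0 then t ++ ['Y'] else t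
          let t := if PySem.List.pyGetD row 2 0 ≠ 0 then t ++ ['Z'] else t
          let t := if i = 0 ∧ PySem.List.pyGetD row 3 0 ≠ 0 then t ++ ['1'] else t
          terms ++ [t]
        else terms) acc
      = acc ++ ((List.range n).filter (fun j => pvCoef f j ≠ 0)).map
          (fun (j : ℕ) => termC table (j : Int)) := by
  induction n with
  | zero => simp [PySem.List.pyRange_one_eq_nil (by omega : (0:Int) ≤ 0)]
  | succ n ih =>
    have hc : ((n + 1 : ℕ) : Int) = (n : Int) + 1 := by push_cast; ring
    rw [hc, PySem.List.pyRange_one_succ_right (by positivity), List.foldl_append,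
      ih (by omega), List.foldl_cons, List.foldl_nil]
    simp only [coefB f n (by omega)]
    rw [List.range_succ, List.filter_append, List.map_append]
    by_cases hnz : pvCoef f n ≠ 0 <;> simp [hnz, termC, List.append_assoc]

theorem join_flat (sep : List Char) :
    ∀ L : List (List Char), L ≠ [] →
      L.flatMap (fun t => t ++ sep) = PySem.Chars.join sep L ++ sep := by
  intro L
  induction L with
  | nil => intro h; exact absurd rfl h
  | cons a t ih =>
    intro _
    cases t with
    | nil => simp [PySem.Chars.join_singleton]
    | cons b r =>
      rw [List.flatMap_cons, ih (by simp), PySem.Chars.join_cons_cons]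
      simp [List.append_assoc]

theorem flatMap_map_term (table : List (List Int)) (sep : List Char) (F : List ℕ) :
    F.flatMap (fun (j : ℕ) => termC table (j : Int) ++ sep)
      = (F.map (fun (j : ℕ) => termC table (j : Int))).flatMap (fun t => t ++ sep) := by
  induction F with
  | nil => rfl
  | cons a t ih => simp [List.flatMap_cons, ih]

-- ===== VERDICT (by name: the statement is the Claim_ definition above) =====
theorem filter_coef (f : List Int) :
    (List.range f.length).filter
        (fun j => ((List.range f.length).map (fun j => pvCoef f j)).getD j 0 ≠ 0)
      = (List.range f.length).filter (fun j => pvCoef f j ≠ 0) := by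
  apply List.filter_congr
  intro a ha
  rw [PySem.List.getD_map_range _ _ _ _ (List.mem_range.1 ha)]

theorem zhegalkin_spec : Claim_equal_zhegalkin := by
  intro table f _hDom _hPre
  show zhegalkin table f = zhegalkin_alt table f
  have hA : zhegalkin table f
      = String.ofList (PySem.List.slice
          ("F3 = ".toList ++
            ((List.range f.length).filter (fun j => pvCoef f j ≠ 0)).flatMap
              (fun (j : ℕ) => termC table (j : Int) ++ " ⊕ ".toList))
          (some 0) (some (-2))) := by
    rw [zhegalkin]
    simp only [innerA, PySem.List.pyGetD_zero]
    rw [outerA]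
    have hlen : (PySem.List.pyRange 0 (f.length : Int)).length = f.length := by
      rw [PySem.List.length_pyRange_one]; omega
    simp only [hlen, List.nil_append]
    have hTR : (List.range f.length).map (fun j => (derivL^[j] f).getD 0 0)
        = (List.range f.length).map (fun j => pvCoef f j) :=
      List.map_congr_left (fun j hj => coef_head j f (List.mem_range.1 hj))
    rw [hTR]
    simp only [List.length_map, List.length_range]
    rw [fmtA table ((List.range f.length).map (fun j => pvCoef f j)) f.length _ (by simp),
      filter_coef]
  have hB : zhegalkin_alt table f
      = (if (((List.range f.length).filter (fun j => pvCoef f j ≠ 0)).map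
              (fun (j : ℕ) => termC table (j : Int))) ≠ [] then
          String.ofList ("F3 = ".toList
            ++ PySem.Chars.join " ⊕ ".toList
                (((List.range f.length).filter (fun j => pvCoef f j ≠ 0)).map
                  (fun (j : ℕ) => termC table (j : Int)))
            ++ [' '])
        else "F3 ") := by
    show (if ((PySem.List.pyRange 0 (f.length : Int) 1).foldl
      (fun (terms : List (List Char)) i =>
        let c := (PySem.List.pyRange 0 (i + 1) 1).foldl
          (fun c k =>
            if PySem.Int.band k i = k then PySem.Int.bxor c (PySem.List.pyGetD f k 0) else c) 0
        if c ≠ 0 then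
          let row := PySem.List.pyGetD table i []
          let t : List Char := []
          let t := if PySem.List.pyGetD row 0 0 ≠ 0 then t ++ ['X'] else t
          let t := if PySem.List.pyGetD row 1 0 ≠ 0 then t ++ ['Y'] else t
          let t := if PySem.List.pyGetD row 2 0 ≠ 0 then t ++ ['Z'] else t
          let t := if i = 0 ∧ PySem.List.pyGetD row 3 0 ≠ 0 then t ++ ['1'] else t
          terms ++ [t]
        else terms) []) ≠ [] then
      String.ofList ("F3 = ".toList
        ++ PySem.Chars.join " ⊕ ".toList ((PySem.List.pyRange 0 (f.length : Int) 1).foldl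
          (fun (terms : List (List Char)) i =>
            let c := (PySem.List.pyRange 0 (i + 1) 1).foldl
              (fun c k =>
                if PySem.Int.band k i = k then PySem.Int.bxor c (PySem.List.pyGetD f k 0) else c) 0
            if c ≠ 0 then
              let row := PySem.List.pyGetD table i []
              let t : List Char := []
              let t := if PySem.List.pyGetD row 0 0 ≠ 0 then t ++ ['X'] else t
              let t := if PySem.List.pyGetD row 1 0 ≠ 0 then t ++ ['Y'] else t
              let t := if PySem.List.pyGetD row 2 0 ≠ 0 then t ++ ['Z'] else t
              let t := if i = 0 ∧ PySem.List.pyGetD row 3 0 ≠ 0 then t ++ ['1'] else t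
              terms ++ [t]
            else terms) []) ++ [' '])
      else "F3 ") = _
    rw [fmtB table f f.length le_rfl []]
    simp only [List.nil_append]
  rw [hA, hB, flatMap_map_term]
  set T := ((List.range f.length).filter (fun j => pvCoef f j ≠ 0)).map
    (fun (j : ℕ) => termC table (j : Int)) with hT
  by_cases hTe : T = []
  · rw [hTe]
    rw [if_neg (by simp : ¬(([] : List (List Char)) ≠ []))]
    simp only [List.flatMap_nil, List.append_nil]
    simp only [PySem.List.slice_zero_start]
    rw [PySem.List.slice_to_neg_ofNat _ 2 (by omega)]
    decide
  · rw [join_flat _ T hTe, if_pos hTe]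
    rw [show " ⊕ ".toList = [' '] ++ ['⊕', ' '] from by decide]
    simp only [PySem.List.slice_zero_start]
    rw [PySem.List.slice_to_neg_ofNat _ 2 (by omega)]
    rw [show "F3 = ".toList ++ (PySem.Chars.join ([' '] ++ ['⊕', ' ']) T ++ ([' '] ++ ['⊕', ' ']))
        = ("F3 = ".toList ++ PySem.Chars.join ([' '] ++ ['⊕', ' ']) T ++ [' ']) ++ ['⊕', ' '] from by
      simp [List.append_assoc]]
    rw [List.take_left' (by simp [List.length_append]; try omega)]
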